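-- pv_equiv track=rewrite | github.com/shadensharp/coding-agent-demo-public | src/coding_agent/webapp.py | _review_preview
-- ===== SOURCE A (Python) =====
-- def _one_line(value: object) -> str:
--     if value is None:
--         return ""
--     return " ".join(str(value).strip().split())
--
-- def _review_preview(value: object) -> str:
--     text = _one_line(value)
--     if not text:
--         return ""
--     markers = ["Proposal assessment:", "Grounding:", "External research:", "Read evidence:", "Evidence:", "Validation:", "Audit:", "LLM note:", "Residual risk:"]
--     end = len(text)
--     for marker in markers:
--         index = text.find(marker)
--         if index != -1:
--             end = min(end, index)
--     if end != len(text):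
--         return text[:end].rstrip(" .") + "."
--     return text
-- ===== SOURCE B (Python) =====
-- _MARKERS = ("Proposal assessment:", "Grounding:", "External research:", "Read evidence:", "Evidence:", "Validation:", "Audit:", "LLM note:", "Residual risk:")
--
-- def _one_line(value: object) -> str:
--     if value is None:
--         return ""
--     return " ".join(str(value).strip().split())
--
-- def _review_preview(value: object) -> str:
--     text = _one_line(value)
--     if not text:
--         return ""
--     cut = next((i for i in range(len(text))
--                 if any(text.startswith(m, i) for m in _MARKERS)), None)
--     if cut is None:
--         return text
--     return text[:cut].rstrip(" .") + "."
-- ===== Notes on version B (the rewrite author's own statement) =====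
-- stated objective: alternative
-- what changed: A runs nine independent str.find scans over the whole text and folds a running min of the hit positions; B does one left-to-right scan over positions and stops at the first position where any marker starts (leftmost match), so the per-marker finds and the min-fold disappear; it trades C-speed find calls for an early-exiting single pass.
import Mathlib
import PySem

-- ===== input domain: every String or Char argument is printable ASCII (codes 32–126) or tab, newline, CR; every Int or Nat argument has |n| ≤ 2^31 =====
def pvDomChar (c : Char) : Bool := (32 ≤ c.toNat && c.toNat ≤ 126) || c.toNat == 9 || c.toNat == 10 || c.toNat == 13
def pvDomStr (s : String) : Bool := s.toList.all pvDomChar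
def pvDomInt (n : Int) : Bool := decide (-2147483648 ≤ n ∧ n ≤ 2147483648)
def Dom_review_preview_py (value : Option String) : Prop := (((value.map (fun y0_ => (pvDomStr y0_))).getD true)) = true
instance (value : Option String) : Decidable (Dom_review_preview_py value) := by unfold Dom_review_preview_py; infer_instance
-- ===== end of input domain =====

-- B replaces A's nine independent `find` scans + running `min` by ONE left-to-right scan that stops
-- at the first position where any marker starts (objective: alternative traversal, same exact result).

-- ===== PORT A =====
-- shared helper `_one_line` (identical in both Python sources): " ".join(str(value).strip().split())
def rpOneLine (value : Option String) : List Char :=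
  match value with
  | none => []
  | some s => PySem.Chars.join [' '] (PySem.Chars.split₀ (PySem.Chars.strip s.toList))

-- shared primitive call `.rstrip(" .")` (exact port: drop trailing chars that are ' ' or '.')
def rpRstripDots (cs : List Char) : List Char :=
  (cs.reverse.dropWhile (fun c => c == ' ' || c == '.')).reverse

def rpMarkers : List (List Char) :=
  ["Proposal assessment:".toList, "Grounding:".toList, "External research:".toList,
   "Read evidence:".toList, "Evidence:".toList, "Validation:".toList, "Audit:".toList,
   "LLM note:".toList, "Residual risk:".toList]

def review_preview_py (value : Option String) : String :=
  let text := rpOneLine value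
  if text = [] then ""
  else
    let endv := rpMarkers.foldl (fun e m =>
      let index := PySem.Chars.find text m
      if index ≠ -1 then min e index else e) (PySem.Chars.len text)
    if endv ≠ PySem.Chars.len text then
      String.ofList (rpRstripDots (PySem.Chars.slice text none (some endv)) ++ ['.'])
    else String.ofList text

-- ===== PORT B =====
-- `next((i for i in range(len(text)) if any(text.startswith(m, i) …)), None)`:
-- walk the suffixes left to right carrying the index i; text.startswith(m, i) = startswith on the suffix
def rpScan (markers : List (List Char)) (i : Int) : List Char → Option Int
  | [] => none
  | c :: rest =>
    if markers.any (fun m => PySem.Chars.startswith (c :: rest) m) then some i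
    else rpScan markers (i + 1) rest

def review_preview_py_alt (value : Option String) : String :=
  let text := rpOneLine value
  if text = [] then ""
  else
    match rpScan rpMarkers 0 text with
    | none => String.ofList text
    | some cut => String.ofList (rpRstripDots (PySem.Chars.slice text none (some cut)) ++ ['.'])

-- ===== PRECONDITION & SPEC =====
def Spec_review_preview_py (value : Option String) (out : String) : Prop := out = review_preview_py_alt value
instance (value : Option String) (out : String) : Decidable (Spec_review_preview_py value out) := by unfold Spec_review_preview_py; infer_instance

-- ===== CLAIM (what is proved, stated in full; the proofs are below) =====
def Claim_equal_review_preview_py : Prop := ∀ (value : Option String), Dom_review_preview_py value → Spec_review_preview_py value (review_preview_py value)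

-- ===== LEMMAS AND PROOFS =====

-- "some marker starts at position j of L"
def rpHit (L : List Char) (j : Nat) : Prop := ∃ m ∈ rpMarkers, m <+: L.drop j

-- A's fold, abstracted over the marker list (written in the simp-normal ite orientation)
def rpFold (L : List Char) (ms : List (List Char)) (e : Int) : Int :=
  ms.foldl (fun e m => if PySem.Chars.find L m = -1 then e else min e (PySem.Chars.find L m)) e

lemma rpFold_cons (L : List Char) (m : List Char) (ms : List (List Char)) (e : Int) :
    rpFold L (m :: ms) e =
      rpFold L ms (if PySem.Chars.find L m = -1 then e else min e (PySem.Chars.find L m)) := rfl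

lemma rpMarkers_ne_nil : ∀ m ∈ rpMarkers, m ≠ [] := by decide

lemma rpFold_le (L : List Char) (ms : List (List Char)) (e : Int) :
    rpFold L ms e ≤ e ∧ ∀ m ∈ ms, PySem.Chars.find L m ≠ -1 → rpFold L ms e ≤ PySem.Chars.find L m := by
  induction ms generalizing e with
  | nil => exact ⟨le_refl _, by simp⟩
  | cons m ms ih =>
    rw [rpFold_cons]
    refine ⟨le_trans (ih _).1 ?_, ?_⟩
    · split_ifs with h
      · exact le_refl _
      · exact min_le_left _ _
    · intro m' hm' hf
      rcases List.mem_cons.mp hm' with rfl | hm'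
      · refine le_trans (ih _).1 ?_
        rw [if_neg hf]
        exact min_le_right _ _
      · exact (ih _).2 m' hm' hf

lemma rpFold_cases (L : List Char) (ms : List (List Char)) (e : Int) :
    rpFold L ms e = e ∨ ∃ m ∈ ms, PySem.Chars.find L m ≠ -1 ∧ rpFold L ms e = PySem.Chars.find L m := by
  induction ms generalizing e with
  | nil => exact Or.inl rfl
  | cons m ms ih =>
    rw [rpFold_cons]
    by_cases hf : PySem.Chars.find L m = -1
    · rw [if_pos hf]
      rcases ih e with h | ⟨m', hm', hf', h⟩
      · exact Or.inl h
      · exact Or.inr ⟨m', List.mem_cons_of_mem _ hm', hf', h⟩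
    · rw [if_neg hf]
      rcases ih (min e (PySem.Chars.find L m)) with h | ⟨m', hm', hf', h⟩
      · rcases le_total e (PySem.Chars.find L m) with hle | hle
        · exact Or.inl (by rw [h, min_eq_left hle])
        · exact Or.inr ⟨m, List.mem_cons_self, hf, by rw [h, min_eq_right hle]⟩
      · exact Or.inr ⟨m', List.mem_cons_of_mem _ hm', hf', h⟩

lemma rpScan_none (L : List Char) (i : Int) :
    rpScan rpMarkers i L = none → ∀ j < L.length, ¬ rpHit L j := by
  induction L generalizing i with
  | nil => simp
  | cons c rest ih =>
    intro h j hj hhit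
    rw [rpScan] at h
    by_cases hs : (rpMarkers.any fun m => PySem.Chars.startswith (c :: rest) m) = true
    · rw [if_pos hs] at h
      exact Option.some_ne_none _ h
    · rw [if_neg hs] at h
      rcases Nat.eq_zero_or_pos j with rfl | hj0
      · apply hs
        rcases hhit with ⟨m, hm, hpre⟩
        exact List.any_eq_true.mpr ⟨m, hm, (PySem.Chars.startswith_iff _ _).mpr (by simpa using hpre)⟩
      · refine ih (i + 1) h (j - 1) (by simp at hj; omega) ?_
        rcases hhit with ⟨m, hm, hpre⟩
        refine ⟨m, hm, ?_⟩
        have hd : (c :: rest).drop j = rest.drop (j - 1) := by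
          rcases j with _ | j
          · omega
          · simp
        rwa [hd] at hpre

lemma rpScan_some (L : List Char) (i : Int) (r : Int) :
    rpScan rpMarkers i L = some r →
    ∃ j : Nat, r = i + j ∧ j < L.length ∧ rpHit L j ∧ ∀ k < j, ¬ rpHit L k := by
  induction L generalizing i r with
  | nil => simp [rpScan]
  | cons c rest ih =>
    intro h
    rw [rpScan] at h
    by_cases hs : (rpMarkers.any fun m => PySem.Chars.startswith (c :: rest) m) = true
    · rw [if_pos hs] at h
      injection h with h
      refine ⟨0, by omega, by simp, ?_, by simp⟩
      rcases List.any_eq_true.mp hs with ⟨m, hm, hsw⟩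
      exact ⟨m, hm, by simpa using (PySem.Chars.startswith_iff _ _).mp hsw⟩
    · rw [if_neg hs] at h
      rcases ih (i + 1) r h with ⟨j, hr, hj, hhit, hmin⟩
      refine ⟨j + 1, by omega, by simpa using Nat.succ_lt_succ hj, ?_, ?_⟩
      · rcases hhit with ⟨m, hm, hpre⟩
        exact ⟨m, hm, by simpa using hpre⟩
      · intro k hk
        rcases Nat.eq_zero_or_pos k with rfl | hk0
        · intro hhit0
          apply hs
          rcases hhit0 with ⟨m, hm, hpre⟩
          exact List.any_eq_true.mpr ⟨m, hm, (PySem.Chars.startswith_iff _ _).mpr (by simpa using hpre)⟩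
        · intro hhitk
          refine hmin (k - 1) (by omega) ?_
          rcases hhitk with ⟨m, hm, hpre⟩
          refine ⟨m, hm, ?_⟩
          have hd : (c :: rest).drop k = rest.drop (k - 1) := by
            rcases k with _ | k
            · omega
            · simp
          rwa [hd] at hpre

-- a hit yields a find ≠ -1 that points no later than the hit
lemma rpFind_of_hit (L : List Char) (j : Nat) (m : List Char)
    (_hm : m ∈ rpMarkers) (hpre : m <+: L.drop j) :
    PySem.Chars.find L m ≠ -1 ∧ PySem.Chars.find L m ≤ (j : Int) := by
  have hinf : m <:+: L := hpre.isInfix.trans (L.drop_suffix j).isInfix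
  have hne : PySem.Chars.find L m ≠ -1 := (PySem.Chars.find_ne_neg_one_iff _ _).mpr hinf
  have h0 : 0 ≤ PySem.Chars.find L m := by
    have := PySem.Chars.neg_one_le_find L m; omega
  refine ⟨hne, ?_⟩
  by_contra hlt
  exact (PySem.Chars.find_spec h0).2 j (by omega) hpre

lemma rpFold_eq_of_scan_none (L : List Char)
    (h : rpScan rpMarkers 0 L = none) :
    rpFold L rpMarkers (L.length : Int) = (L.length : Int) := by
  rcases rpFold_cases L rpMarkers (L.length : Int) with h' | ⟨m, hm, hf, h'⟩
  · exact h'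
  · exfalso
    have h0 : 0 ≤ PySem.Chars.find L m := by
      have := PySem.Chars.neg_one_le_find L m; omega
    have hpre := (PySem.Chars.find_spec h0).1
    have hjlt : (PySem.Chars.find L m).toNat < L.length := by
      by_contra hge
      have hnil : L.drop (PySem.Chars.find L m).toNat = [] := List.drop_eq_nil_of_le (by omega)
      rw [hnil] at hpre
      exact rpMarkers_ne_nil m hm (List.prefix_nil.mp hpre)
    exact rpScan_none L 0 h _ hjlt ⟨m, hm, hpre⟩

lemma rpFold_eq_of_scan_some (L : List Char) (c : Int)
    (h : rpScan rpMarkers 0 L = some c) :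
    rpFold L rpMarkers (L.length : Int) = c ∧ c ≠ (L.length : Int) := by
  rcases rpScan_some L 0 c h with ⟨j, hc, hj, ⟨m0, hm0, hpre0⟩, hmin⟩
  have hc' : c = (j : Int) := by omega
  subst hc'
  obtain ⟨hne0, hle0⟩ := rpFind_of_hit L j m0 hm0 hpre0
  have hrle : rpFold L rpMarkers (L.length : Int) ≤ (j : Int) :=
    le_trans ((rpFold_le L rpMarkers _).2 m0 hm0 hne0) hle0
  have hjn : ((j : Int)) < (L.length : Int) := by exact_mod_cast hj
  constructor
  · rcases rpFold_cases L rpMarkers (L.length : Int) with h' | ⟨m, hm, hf, h'⟩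
    · omega
    · have h0 : 0 ≤ PySem.Chars.find L m := by
        have := PySem.Chars.neg_one_le_find L m; omega
      have hpre := (PySem.Chars.find_spec h0).1
      have hge : (j : Int) ≤ PySem.Chars.find L m := by
        by_contra hlt
        exact hmin (PySem.Chars.find L m).toNat (by omega) ⟨m, hm, hpre⟩
      omega
  · omega

theorem rp_main (value : Option String) :
    review_preview_py value = review_preview_py_alt value := by
  unfold review_preview_py review_preview_py_alt
  set L := rpOneLine value with hL
  by_cases hnil : L = []
  · simp [hnil]
  · simp only [if_neg hnil, PySem.Chars.len_eq]
    cases hscan : rpScan rpMarkers 0 L with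
    | none =>
      have h1 := rpFold_eq_of_scan_none L hscan
      rw [rpFold] at h1
      simp [h1]
    | some c =>
      have h1 := rpFold_eq_of_scan_some L c hscan
      rw [rpFold] at h1
      simp [h1.1, h1.2]

-- ===== VERDICT (by name: the statement is the Claim_ definition above) =====
theorem review_preview_py_spec : Claim_equal_review_preview_py := by
  intro value _
  exact rp_main value
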